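-- pv_equiv track=rewrite | github.com/nahcikeel/Algorithm | 프로그래머스/3/64064. 불량 사용자/불량 사용자.py | solution
-- ===== SOURCE A (Python) =====
-- from itertools import product
--
-- def solution(user_id, banned_id):
--     result = []
--
--     for ban in banned_id:
--         n = len(ban)
--         match = []
--
--         for user in user_id:
--             if len(user) == n:
--                 for i in range(n):
--                     if user[i] != ban[i] and ban[i] != '*':
--                         break
--                 else:
--                     match.append(user)
--
--         result.append(match)
--
--     product_list = list(product(*result))
--     unique_set = set()
--
--     for pro in product_list:
--         if len(set(pro)) == len(pro):
--             unique_set.add(frozenset(pro))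
--
--     return len(unique_set)
-- ===== SOURCE B (Python) =====
-- def solution(user_id, banned_id):
--     # DFS/backtracking: pick one matching, not-yet-used user per banned pattern;
--     # dedup the resulting user sets via a set of frozensets.
--     matches = [
--         [u for u in user_id
--          if len(u) == len(ban) and all(b == '*' or a == b for a, b in zip(u, ban))]
--         for ban in banned_id
--     ]
--
--     def dfs(ms, chosen):
--         if not ms:
--             return [frozenset(chosen)]
--         res = []
--         for u in ms[0]:
--             if u not in chosen:
--                 res.extend(dfs(ms[1:], chosen + [u]))
--         return res
--
--     return len(set(dfs(matches, [])))
-- ===== Notes on version B (the rewrite author's own statement) =====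
-- stated objective: alternative
-- what changed: A materialises the full Cartesian product of the per-ban candidate lists and then filters out tuples with repeated users; B does DFS/backtracking that picks one not-yet-used candidate per banned pattern, pruning repeated users as soon as they occur, and dedups the resulting user sets via a set of frozensets.
import Mathlib
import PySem

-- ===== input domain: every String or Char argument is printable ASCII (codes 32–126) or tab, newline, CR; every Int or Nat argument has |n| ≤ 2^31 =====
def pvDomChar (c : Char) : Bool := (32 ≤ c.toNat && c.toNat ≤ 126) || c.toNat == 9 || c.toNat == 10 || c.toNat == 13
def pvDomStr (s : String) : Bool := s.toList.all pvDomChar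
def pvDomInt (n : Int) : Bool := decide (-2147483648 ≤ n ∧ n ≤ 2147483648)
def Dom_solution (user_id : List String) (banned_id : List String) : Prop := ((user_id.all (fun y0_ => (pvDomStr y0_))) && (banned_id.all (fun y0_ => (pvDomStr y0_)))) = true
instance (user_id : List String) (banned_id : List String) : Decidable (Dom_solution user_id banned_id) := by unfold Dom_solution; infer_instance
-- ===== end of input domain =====

-- B replaces A's materialised Cartesian product + distinctness filter with DFS/backtracking
-- that prunes already-used users, deduplicating via a set of frozensets (objective: alternative).

-- ===== PORT A =====
-- inner 'for i in range(n): … break / else append' loop, run along the two equal-length strings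
def aCharLoop : List Char → List Char → Bool
  | u :: us, b :: bs => if u != b && b != '*' then false else aCharLoop us bs
  | _, _ => true

-- the 'for user in user_id' loop building 'match' for one ban
def aMatchOf (user_id : List String) (ban : String) : List String :=
  user_id.foldl (fun m user =>
    if user.toList.length == ban.toList.length && aCharLoop user.toList ban.toList
    then m ++ [user] else m) []

def solution (user_id : List String) (banned_id : List String) : Int :=
  let result := banned_id.foldl (fun r ban => r ++ [aMatchOf user_id ban]) []
  -- list(product(*result)) : fold over the factor lists, extending each partial tuple
  let product_list := result.foldl
    (fun acc m => acc.flatMap (fun t => m.map (fun u => t ++ [u]))) [[]]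
  -- frozenset(pro) is ported as the canonical sorted list of pro's (pairwise-distinct) elements
  let unique_set := product_list.foldl (fun s pro =>
    if (PySem.Set.ofList pro).length == pro.length
    then PySem.Set.add s (PySem.List.sorted pro (fun x => x) false)
    else s) PySem.Set.empty
  (unique_set.length : Int)

-- ===== PORT B =====
def bMatch (u : List Char) (b : List Char) : Bool :=
  (u.zip b).all (fun p => p.2 == '*' || p.1 == p.2)

-- DFS: pick one not-yet-used matching user per ban; frozenset(chosen) ported as sorted chosen
def bDfs : List (List String) → List String → List (List String)
  | [], chosen => [PySem.List.sorted chosen (fun x => x) false]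
  | m :: rest, chosen =>
      (m.filter (fun u => !(chosen.contains u))).flatMap (fun u => bDfs rest (chosen ++ [u]))

def solution_alt (user_id : List String) (banned_id : List String) : Int :=
  let mlists := banned_id.map (fun ban => user_id.filter (fun u =>
    u.toList.length == ban.toList.length && bMatch u.toList ban.toList))
  ((PySem.Set.ofList (bDfs mlists [])).length : Int)

-- ===== PRECONDITION & SPEC =====
def Spec_solution (user_id : List String) (banned_id : List String) (out : Int) : Prop := out = solution_alt user_id banned_id
instance (user_id : List String) (banned_id : List String) (out : Int) : Decidable (Spec_solution user_id banned_id out) := by unfold Spec_solution; infer_instance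

-- ===== CLAIM (what is proved, stated in full; the proofs are below) =====
def Claim_equal_solution : Prop := ∀ (user_id : List String) (banned_id : List String), Dom_solution user_id banned_id → Spec_solution user_id banned_id (solution user_id banned_id)

-- ===== LEMMAS AND PROOFS =====

-- A's char loop agrees with B's zip-all test
lemma aCharLoop_eq_bMatch : ∀ (us bs : List Char), aCharLoop us bs = bMatch us bs := by
  intro us
  induction us with
  | nil => intro bs; cases bs <;> simp [aCharLoop, bMatch]
  | cons u us ih =>
      intro bs
      cases bs with
      | nil => simp [aCharLoop, bMatch]
      | cons b bs =>
          show (if (!(u == b)) && !(b == '*') then false else aCharLoop us bs) = _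
          rw [ih]
          cases h1 : (u == b) <;> cases h2 : (b == '*') <;>
            simp only [bMatch, List.zip_cons_cons, List.all_cons, h1, h2,
              Bool.not_true, Bool.not_false, Bool.and_self, Bool.false_and, Bool.and_false,
              Bool.true_and, Bool.and_true, Bool.or_self, Bool.false_or, Bool.or_false,
              Bool.true_or, Bool.or_true, if_true, if_false] <;> simp

-- head-recursive form of the product fold
def prodR : List (List String) → List (List String)
  | [] => [[]]
  | m :: rest => m.flatMap (fun u => (prodR rest).map (fun t => u :: t))

lemma foldl_prod_eq : ∀ (ms : List (List String)) (acc : List (List String)),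
    ms.foldl (fun acc m => acc.flatMap (fun t => m.map (fun u => t ++ [u]))) acc
      = acc.flatMap (fun t => (prodR ms).map (fun s => t ++ s)) := by
  intro ms
  induction ms with
  | nil => intro acc; simp [prodR]
  | cons m rest ih =>
      intro acc
      rw [List.foldl_cons, ih]
      simp [prodR, List.flatMap_assoc, List.map_flatMap, List.flatMap_map, List.map_map,
        Function.comp_def, List.append_assoc]

lemma ofList_length_iff (xs : List String) :
    ((PySem.Set.ofList xs).length = xs.length) ↔ xs.Nodup := by
  constructor
  · intro h
    have hperm : (PySem.Set.ofList xs).Perm xs.dedup := by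
      rw [List.perm_ext_iff_of_nodup (PySem.Set.nodup_ofList xs) (List.nodup_dedup xs)]
      intro a; simp [PySem.Set.mem_ofList, List.mem_dedup]
    have hlen : xs.dedup.length = xs.length := by rw [← hperm.length_eq]; exact h
    exact List.dedup_eq_self.mp ((xs.dedup_sublist).eq_of_length hlen)
  · intro h
    rw [PySem.Set.ofList_eq_self_of_nodup xs h]

-- filter-then-map pushed through a flatMap
lemma filter_map_flatMap {α β γ : Type} (P : β → Bool) (F : β → γ) :
    ∀ (l : List α) (g : α → List β),
      ((l.flatMap g).filter P).map F = l.flatMap (fun u => ((g u).filter P).map F) := by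
  intro l g
  induction l with
  | nil => simp
  | cons x l ihl => simp [List.flatMap_cons, List.filter_append, List.map_append, ihl]

lemma bDfs_eq : ∀ (ms : List (List String)) (chosen : List String), chosen.Nodup →
    bDfs ms chosen
      = ((prodR ms).filter (fun t => decide ((chosen ++ t).Nodup))).map
          (fun t => PySem.List.sorted (chosen ++ t) (fun x => x) false) := by
  intro ms
  induction ms with
  | nil =>
      intro chosen hnd
      simp [bDfs, prodR, hnd]
  | cons m rest ih =>
      intro chosen hnd
      rw [show bDfs (m :: rest) chosen
            = (m.filter (fun u => !(chosen.contains u))).flatMap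
                (fun u => bDfs rest (chosen ++ [u])) from rfl]
      rw [show prodR (m :: rest) = m.flatMap (fun u => (prodR rest).map (fun t => u :: t)) from rfl]
      rw [filter_map_flatMap]
      induction m with
      | nil => simp
      | cons u l ihl =>
          by_cases hu : u ∈ chosen
          · have hempty : ((prodR rest).map (fun t => u :: t)).filter
                (fun t => decide ((chosen ++ t).Nodup)) = [] := by
              rw [List.filter_eq_nil_iff]
              intro t ht
              simp only [List.mem_map] at ht
              obtain ⟨t', _, rfl⟩ := ht
              simp only [decide_eq_true_eq]
              intro hnodup
              have hdisj := (List.nodup_append.mp hnodup).2.2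
              exact hdisj u hu u (by simp) rfl
            have hq : ¬(((fun u => !(chosen.contains u)) u) = true) := by simp [hu]
            rw [show List.filter (fun u => !(chosen.contains u)) (u :: l)
                  = List.filter (fun u => !(chosen.contains u)) l from List.filter_cons_of_neg hq,
              List.flatMap_cons, hempty]
            simp only [List.map_nil, List.nil_append]
            exact ihl
          · have hnd2 : (chosen ++ [u]).Nodup := by
              rw [List.nodup_append]
              refine ⟨hnd, List.nodup_singleton u, fun a ha b hb => ?_⟩
              simp only [List.mem_singleton] at hb
              subst hb
              exact fun h => hu (h ▸ ha)
            have hq : ((fun u => !(chosen.contains u)) u) = true := by simp [hu]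
            rw [show List.filter (fun u => !(chosen.contains u)) (u :: l)
                  = u :: List.filter (fun u => !(chosen.contains u)) l from List.filter_cons_of_pos hq,
              List.flatMap_cons, List.flatMap_cons, ihl, ih _ hnd2]
            congr 1
            conv_rhs => rw [List.filter_map, List.map_map]
            simp only [Function.comp_def, List.append_assoc, List.singleton_append]

lemma foldl_add_if (p : List String → Bool) (f : List String → List String) :
    ∀ (l : List (List String)) (s : List (List String)),
      l.foldl (fun s pro => if p pro then PySem.Set.add s (f pro) else s) s
        = ((l.filter p).map f).foldl PySem.Set.add s := by
  intro l
  induction l with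
  | nil => intro s; simp
  | cons x l ih =>
      intro s
      by_cases h : p x <;> simp [List.foldl_cons, h, ih]

-- the two per-ban candidate lists coincide
lemma match_lists_eq (user_id : List String) :
    ∀ ban, aMatchOf user_id ban
      = user_id.filter (fun u =>
          u.toList.length == ban.toList.length && bMatch u.toList ban.toList) := by
  intro ban
  unfold aMatchOf
  rw [PySem.List.foldl_append_if_eq_filter]
  rw [List.nil_append]
  apply List.filter_congr
  intro u _
  rw [aCharLoop_eq_bMatch]

theorem solution_spec : Claim_equal_solution := by
  unfold Claim_equal_solution
  intro user_id banned_id _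
  unfold Spec_solution solution solution_alt
  simp only []
  rw [PySem.List.foldl_append_singleton_eq_map, List.nil_append]
  have hml : banned_id.map (aMatchOf user_id)
      = banned_id.map (fun ban => user_id.filter (fun u =>
          u.toList.length == ban.toList.length && bMatch u.toList ban.toList)) :=
    List.map_congr_left (fun ban _ => match_lists_eq user_id ban)
  rw [hml]
  set K := banned_id.map (fun ban => user_id.filter (fun u =>
      u.toList.length == ban.toList.length && bMatch u.toList ban.toList)) with hK
  rw [foldl_prod_eq]
  have hprod : ([[]] : List (List String)).flatMap (fun t => (prodR K).map (fun s => t ++ s))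
      = prodR K := by simp
  rw [hprod]
  rw [foldl_add_if]
  rw [show (PySem.Set.empty : PySem.Set (List String)) = ([] : List (List String)) from rfl]
  rw [← PySem.Set.ofList_eq_foldl]
  have hcond : (prodR K).filter (fun pro => (PySem.Set.ofList pro).length == pro.length)
      = (prodR K).filter (fun t => decide (t.Nodup)) := by
    apply List.filter_congr
    intro t _
    rw [Bool.eq_iff_iff]
    simp [ofList_length_iff]
  rw [hcond]
  rw [bDfs_eq K [] List.nodup_nil]
  simp only [List.nil_append]
  rfl
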